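-- pv_equiv track=rewrite | github.com/0xst1tch/StegoImage | main.py | divider
-- ===== SOURCE A (Python) =====
-- from textwrap import wrap
--
-- def divider(encoded_text):
--     # Initialize lists to store binary and integer representations of pixel data
--     pixel_data_bin = []
--     pixel_data_int = []
--     # Convert the length of the encoded text to a binary string and pad with zeros to reach 16 bits
--     length_bin = format(len(encoded_text), 'b').zfill(16)
--     # Split the binary length string into pairs of 2 bits
--     length_bin_pairs = wrap(length_bin, 2)
--     # Iterate through the length_bin_pairs and convert each pair to its corresponding integer representation
--     for i in length_bin_pairs:
--         if i == "00":
--             pixel_data_int.append(0)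
--         elif i == "01":
--             pixel_data_int.append(1)
--         elif i == "10":
--             pixel_data_int.append(2)
--         elif i == "11":
--             pixel_data_int.append(3)
--     # Iterate through the encoded text, convert each character to its 8-bit binary representation, and split it into pairs of 2 bits
--     for i in encoded_text:
--         pixel_data_bin += wrap(str(int(bin(i)[2:])).zfill(8), 2)
--     # Iterate through the pixel_data_bin list and convert each binary pair to its corresponding integer representation
--     for i in pixel_data_bin:
--         if (i == "00"):
--             pixel_data_int.append(0)
--         elif (i == "01"):
--             pixel_data_int.append(1)
--         elif (i == "10"):
--             pixel_data_int.append(2)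
--         elif (i == "11"):
--             pixel_data_int.append(3)
--
--     return pixel_data_int
-- ===== SOURCE B (Python) =====
-- def _bits(n, width):
--     # base-2 digits of n, least significant first, zero-padded to at least `width`,
--     # then reversed to most-significant-first order
--     b = []
--     while n:
--         b.append(n & 1)
--         n >>= 1
--     while len(b) < width:
--         b.append(0)
--     b.reverse()
--     return b
--
--
-- def _pairs(b):
--     # fold consecutive bit pairs into base-4 digits; a trailing odd bit is dropped
--     out = []
--     while len(b) >= 2:
--         out.append(2 * b[0] + b[1])
--         b = b[2:]
--     return out
--
--
-- def divider(encoded_text):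
--     out = _pairs(_bits(len(encoded_text), 16))
--     for i in encoded_text:
--         out += _pairs(_bits(i, 8))
--     return out
-- ===== Notes on version B (the rewrite author's own statement) =====
-- stated objective: simpler
-- what changed: B replaces A's string pipeline (format/bin, zfill, textwrap.wrap, int(str(...)) round-trip and an if/elif chain per 2-char chunk) with pure integer arithmetic: it extracts base-2 digits by masking/shifting and folds consecutive bit pairs into base-4 digits directly.
import Mathlib
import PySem

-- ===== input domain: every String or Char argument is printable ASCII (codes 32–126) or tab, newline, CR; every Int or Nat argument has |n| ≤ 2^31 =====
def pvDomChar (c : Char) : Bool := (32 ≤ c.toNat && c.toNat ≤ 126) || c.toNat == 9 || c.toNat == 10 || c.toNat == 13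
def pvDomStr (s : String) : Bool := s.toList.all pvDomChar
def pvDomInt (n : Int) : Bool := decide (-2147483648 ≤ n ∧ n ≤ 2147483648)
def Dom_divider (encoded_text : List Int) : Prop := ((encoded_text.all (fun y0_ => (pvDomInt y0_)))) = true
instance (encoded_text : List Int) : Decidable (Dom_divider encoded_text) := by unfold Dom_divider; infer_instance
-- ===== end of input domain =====

-- B replaces A's string pipeline (format/zfill/wrap/int-str round-trip/if-elif chunk dispatch)
-- with direct integer arithmetic on base-2 digits, folded pairwise into base-4 digits (simpler).


-- ===== PORT A =====

-- textwrap.wrap(s, 2): chunks of two characters, a shorter last chunk kept.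
-- Exact for the whitespace-free '0'/'1' strings this program wraps.
def pyWrap2 : List Char → List (List Char)
  | [] => []
  | [a] => [[a]]
  | a :: b :: rest => [a, b] :: pyWrap2 rest

-- the if/elif chain of A's two dispatch loops (appends to pixel_data_int; no-op on other chunks)
def pairToInt (acc : List Int) (i : List Char) : List Int :=
  if i = ['0', '0'] then acc ++ [0]
  else if i = ['0', '1'] then acc ++ [1]
  else if i = ['1', '0'] then acc ++ [2]
  else if i = ['1', '1'] then acc ++ [3]
  else acc

-- hand port of Python's int(s) for the strings A feeds it, which are always the pure
-- digit strings bin(i)[2:] with i ≥ 0 (Pre_): exact there (int() extras such as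
-- whitespace/sign/underscore never occur); none = ValueError (e.g. the 'b…' of a negative i).
def pyIntDigits? (cs : List Char) : Option Int :=
  if cs = [] ∨ ¬ cs.all Char.isDigit then none
  else some (cs.foldl (fun a c => 10 * a + ((c.toNat : Int) - 48)) 0)

def divider (encoded_text : List Int) : List Int :=
  let pixel_data_bin : List (List Char) := []
  let pixel_data_int : List Int := []
  let length_bin := PySem.Chars.zfill (PySem.Int.toBinChars (PySem.List.len encoded_text)) 16
  let length_bin_pairs := pyWrap2 length_bin
  let pixel_data_int := length_bin_pairs.foldl pairToInt pixel_data_int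
  let pixel_data_bin := encoded_text.foldl
    (fun acc i =>
      acc ++ pyWrap2 (PySem.Chars.zfill
        (PySem.Int.toChars
          ((pyIntDigits? (PySem.List.slice (PySem.Int.toBinChars0b i) (some 2) none)).getD 0)) 8))
    pixel_data_bin
  pixel_data_bin.foldl pairToInt pixel_data_int

-- ===== PORT B =====

-- the first while loop of _bits: base-2 digits, least significant first
-- (on a Nat; exact for the n ≥ 0 admitted by Pre_)
def bitsWhile (n : Nat) : List Int :=
  if h : n = 0 then [] else ((n % 2 : Nat) : Int) :: bitsWhile (n / 2)
  decreasing_by exact Nat.div_lt_self (Nat.pos_of_ne_zero h) (by norm_num)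

-- _bits: pad with zeros to `width`, then reverse
def bitsB (n : Nat) (width : Nat) : List Int :=
  let b := bitsWhile n
  let b := b ++ List.replicate (width - b.length) 0
  b.reverse

-- _pairs: fold consecutive bit pairs into base-4 digits, dropping a trailing odd bit
def pairsB : List Int → List Int
  | [] => []
  | [_] => []
  | a :: b :: rest => (2 * a + b) :: pairsB rest

def divider_alt (encoded_text : List Int) : List Int :=
  encoded_text.foldl (fun out i => out ++ pairsB (bitsB i.toNat 8))
    (pairsB (bitsB encoded_text.length 16))

-- ===== PRECONDITION & SPEC =====
-- Pre_ excludes exactly the inputs with a negative element, on which A raises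
-- ValueError (int('b…', 10) after bin(i)[2:] keeps the 'b' for negative i).
def Pre_divider (encoded_text : List Int) : Prop := ∀ i ∈ encoded_text, 0 ≤ i
instance (encoded_text : List Int) : Decidable (Pre_divider encoded_text) := by
  unfold Pre_divider; infer_instance

def pvWitness_divider : List Int := [0, 65, 255, 300]

def Spec_divider (encoded_text : List Int) (out : List Int) : Prop := out = divider_alt encoded_text
instance (encoded_text : List Int) (out : List Int) : Decidable (Spec_divider encoded_text out) := by
  unfold Spec_divider; infer_instance

-- ===== CLAIM (what is proved, stated in full; the proofs are below) =====
def Claim_equal_divider : Prop := ∀ (encoded_text : List Int), Dom_divider encoded_text → Pre_divider encoded_text → Spec_divider encoded_text (divider encoded_text)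

-- ===== LEMMAS AND PROOFS =====

-- most-significant-first digit characters of n in base b (what Nat.toDigits produces for n ≠ 0)
def digCh (b n : Nat) : List Char := ((Nat.digits b n).map Nat.digitChar).reverse

-- the character a base-2/base-10 digit becomes on B's side
def iChar (z : Int) : Char := if z = 1 then '1' else '0'

theorem toDigitsCore_eq (b : Nat) (hb : 2 ≤ b) :
    ∀ (fuel n : Nat) (acc : List Char), n < fuel →
      Nat.toDigitsCore b fuel n acc = (if n = 0 then ['0'] else digCh b n) ++ acc := by
  intro fuel
  induction fuel with
  | zero => intro n acc h; omega
  | succ f ih =>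
    intro n acc h
    rw [Nat.toDigitsCore]
    by_cases hdiv : n / b = 0
    · have hnb : n < b := by
        rcases Nat.eq_zero_or_pos n with h0 | hpos
        · omega
        · exact (Nat.div_eq_zero_iff_lt (by omega)).mp hdiv
      simp only [hdiv, if_pos rfl]
      by_cases hn0 : n = 0
      · subst hn0
        simp only [if_pos rfl, Nat.zero_mod]
        show Nat.digitChar 0 :: acc = ['0'] ++ acc
        rfl
      · have hd : Nat.digits b n = [n % b] := by
          rw [Nat.digits_def' (by omega : 1 < b) (Nat.pos_of_ne_zero hn0), hdiv]
          simp
        simp [hn0, digCh, hd]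
    · have hn0 : n ≠ 0 := by
        intro h0; subst h0; simp at hdiv
    -- n / b ≠ 0 forces b ≤ n, so n / b < n ≤ f
      have hble : b ≤ n := by
        by_contra hlt
        exact hdiv (Nat.div_eq_zero_iff_lt (by omega) |>.mpr (by omega))
      have hlt : n / b < f := by
        have := Nat.div_lt_self (by omega : 0 < n) (by omega : 1 < b)
        omega
      simp only [hdiv, if_neg hdiv]
      rw [ih (n / b) (Nat.digitChar (n % b) :: acc) hlt]
      have hdb : Nat.digits b n = n % b :: Nat.digits b (n / b) :=
        Nat.digits_def' (by omega : 1 < b) (Nat.pos_of_ne_zero hn0)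
      by_cases hq0 : n / b = 0
      · exact absurd hq0 hdiv
      · simp [hn0, hq0, digCh, hdb]

theorem toDigits_eq (b n : Nat) (hb : 2 ≤ b) :
    Nat.toDigits b n = (if n = 0 then ['0'] else digCh b n) := by
  have := toDigitsCore_eq b hb (n + 1) n [] (by omega)
  simpa [Nat.toDigits] using this

theorem bitsWhile_eq (n : Nat) : bitsWhile n = (Nat.digits 2 n).map Nat.cast := by
  induction n using Nat.strong_induction_on with
  | _ n ih =>
    rw [bitsWhile]
    by_cases h : n = 0
    · simp [h]
    · rw [dif_neg h, ih (n / 2) (Nat.div_lt_self (Nat.pos_of_ne_zero h) (by norm_num)),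
        Nat.digits_def' (by norm_num : 1 < 2) (Nat.pos_of_ne_zero h)]
      simp

theorem digits_are_bits {n : Nat} {d : Nat} (hd : d ∈ Nat.digits 2 n) : d = 0 ∨ d = 1 := by
  have := Nat.digits_lt_base (by norm_num : 1 < 2) hd
  omega

theorem bitsB_mem {n w : Nat} {x : Int} (hx : x ∈ bitsB n w) : x = 0 ∨ x = 1 := by
  unfold bitsB at hx
  simp only [List.mem_reverse, List.mem_append, List.mem_replicate] at hx
  rcases hx with hx | hx
  · rw [bitsWhile_eq] at hx
    obtain ⟨d, hd, rfl⟩ := List.mem_map.mp hx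
    rcases digits_are_bits hd with rfl | rfl
    · left; rfl
    · right; rfl
  · left; exact hx.2

theorem digitChar_of_lt_ten {d : Nat} (hd : d < 10) :
    (Nat.digitChar d).isDigit = true ∧ (Nat.digitChar d).toNat = 48 + d := by
  interval_cases d <;> exact ⟨rfl, rfl⟩

theorem iChar_eq_digitChar {d : Nat} (hd : d < 2) : iChar (d : Int) = Nat.digitChar d := by
  interval_cases d <;> rfl

theorem bitsB_map_iChar (n w : Nat) :
    (bitsB n w).map iChar
      = List.replicate (w - (bitsWhile n).length) '0' ++ ((bitsWhile n).map iChar).reverse := by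
  unfold bitsB
  simp [List.reverse_append, List.map_reverse, iChar]

theorem revBits_eq_digCh (n : Nat) : ((bitsWhile n).map iChar).reverse = digCh 2 n := by
  rw [bitsWhile_eq, digCh, List.map_map]
  congr 1
  exact List.map_congr_left
    (fun d hd => iChar_eq_digitChar (Nat.digits_lt_base (by norm_num) hd))

theorem digCh_len (n : Nat) : (digCh 2 n).length = (bitsWhile n).length := by
  rw [bitsWhile_eq, digCh]; simp

theorem digCh_chars {n : Nat} {c : Char} (hc : c ∈ digCh 2 n) : c = '0' ∨ c = '1' := by
  rw [digCh] at hc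
  simp only [List.mem_reverse, List.mem_map] at hc
  obtain ⟨d, hd, rfl⟩ := hc
  rcases digits_are_bits hd with rfl | rfl
  · left; rfl
  · right; rfl

-- zfill of the A-side binary string is exactly B's padded bit list rendered as characters
theorem zfill_toDigits (n w : Nat) (hw : 1 ≤ w) :
    PySem.Chars.zfill (Nat.toDigits 2 n) (w : Int) = (bitsB n w).map iChar := by
  rw [toDigits_eq 2 n (by norm_num), bitsB_map_iChar, revBits_eq_digCh]
  by_cases hn : n = 0
  · subst hn
    have h0 : digCh 2 0 = [] := by simp [digCh]
    have hbw : bitsWhile 0 = [] := by rw [bitsWhile]; simp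
    rw [if_pos rfl, h0, hbw]
    simp only [List.length_nil, Nat.sub_zero, List.append_nil]
    rw [PySem.Chars.zfill]
    by_cases hw1 : w = 1
    · subst hw1; norm_num
    · rw [if_neg (by simp; omega)]
      simp only [show ¬('0' = '+' ∨ '0' = '-') by decide, ite_false]
      have h1 : ((w : Int)).toNat = w := by omega
      rw [h1]
      conv_rhs => rw [show w = (w - 1) + 1 from by omega, List.replicate_succ']
      rfl
  · rw [if_neg hn]
    obtain ⟨c, rest, hcs⟩ : ∃ c rest, digCh 2 n = c :: rest := by
      rcases h : digCh 2 n with _ | ⟨c, rest⟩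
      · exfalso
        have hne : Nat.digits 2 n ≠ [] := Nat.digits_ne_nil_iff_ne_zero.mpr hn
        rw [digCh] at h
        simp only [List.reverse_eq_nil_iff, List.map_eq_nil_iff] at h
        exact hne h
      · exact ⟨c, rest, rfl⟩
    have hc01 : c = '0' ∨ c = '1' := digCh_chars (by rw [hcs]; exact List.mem_cons_self)
    have hsign : ¬ (c = '+' ∨ c = '-') := by rcases hc01 with rfl | rfl <;> decide
    have hlen : (c :: rest).length = (bitsWhile n).length := by rw [← hcs, digCh_len]
    rw [hcs, PySem.Chars.zfill]
    by_cases hle : (w : Int) ≤ (((c :: rest).length : Nat) : Int)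
    · rw [if_pos hle]
      have hz : w - (bitsWhile n).length = 0 := by omega
      rw [hz]
      simp
    · rw [if_neg hle]
      simp only [if_neg hsign]
      have h1 : ((w : Int)).toNat = w := by omega
      rw [h1, hlen]

-- A's chunk-dispatch fold over the wrapped character string is B's pair fold
theorem dispatch_eq_pairs :
    ∀ (bs : List Int), (∀ x ∈ bs, x = 0 ∨ x = 1) →
      ∀ acc, (pyWrap2 (bs.map iChar)).foldl pairToInt acc = acc ++ pairsB bs := by
  intro bs
  induction bs using pairsB.induct with
  | case1 => intro _ acc; simp [pyWrap2, pairsB]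
  | case2 a => intro h acc
               rcases h a (by simp) with rfl | rfl <;>
                 simp [pyWrap2, pairsB, iChar, pairToInt]
  | case3 a b rest ih =>
    intro h acc
    have ha := h a (by simp)
    have hb := h b (by simp)
    have hrest : ∀ x ∈ rest, x = 0 ∨ x = 1 := fun x hx => h x (by simp [hx])
    simp only [List.map_cons, pyWrap2, List.foldl_cons]
    rw [ih hrest]
    rcases ha with rfl | rfl <;> rcases hb with rfl | rfl <;>
      simp [pairToInt, iChar, pairsB]

-- the decimal value Python's int() computes from A's binary digit string
theorem foldlDec_eq :
    ∀ (L : List Nat), (∀ d ∈ L, d < 10) → ∀ (a : Int),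
      ((L.map Nat.digitChar).reverse).foldl (fun a c => 10 * a + ((c.toNat : Int) - 48)) a
        = a * 10 ^ L.length + ((Nat.ofDigits 10 L : Nat) : Int) := by
  intro L
  induction L with
  | nil => intro _ a; simp
  | cons d rest ih =>
    intro h a
    have hd := h d (by simp)
    have hrest : ∀ x ∈ rest, x < 10 := fun x hx => h x (by simp [hx])
    simp only [List.map_cons, List.reverse_cons, List.foldl_append, List.foldl_cons,
      List.foldl_nil]
    rw [ih hrest a]
    have hchar : ((Nat.digitChar d).toNat : Int) = 48 + d := by
      have := (digitChar_of_lt_ten hd).2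
      omega
    rw [hchar, Nat.ofDigits_cons, List.length_cons]
    push_cast
    ring

theorem toDigits_all_digits (n : Nat) : (Nat.toDigits 2 n).all Char.isDigit = true := by
  rw [toDigits_eq 2 n (by norm_num)]
  by_cases hn : n = 0
  · subst hn; decide
  · rw [if_neg hn]
    simp only [List.all_eq_true]
    intro c hc
    rcases digCh_chars hc with rfl | rfl <;> decide

theorem toDigits_ne_nil (n : Nat) : Nat.toDigits 2 n ≠ [] := by
  rw [toDigits_eq 2 n (by norm_num)]
  by_cases hn : n = 0
  · subst hn; simp
  · rw [if_neg hn, digCh]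
    simp [Nat.digits_ne_nil_iff_ne_zero.mpr hn]

theorem parse_toDigits (n : Nat) :
    pyIntDigits? (Nat.toDigits 2 n) = some ((Nat.ofDigits 10 (Nat.digits 2 n) : Nat) : Int) := by
  rw [pyIntDigits?, if_neg (by simp [toDigits_ne_nil n, toDigits_all_digits n])]
  congr 1
  by_cases hn : n = 0
  · subst hn; simp [toDigits_eq 2 0 (by norm_num)]
  · rw [toDigits_eq 2 n (by norm_num), if_neg hn, digCh]
    have := foldlDec_eq (Nat.digits 2 n)
      (fun d hd => lt_trans (Nat.digits_lt_base (by norm_num) hd) (by norm_num)) 0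
    rw [this]
    simp

theorem roundtrip (n : Nat) :
    PySem.Int.toChars ((pyIntDigits? (Nat.toDigits 2 n)).getD 0) = Nat.toDigits 2 n := by
  rw [parse_toDigits n]
  set v : Nat := Nat.ofDigits 10 (Nat.digits 2 n) with hv
  have htc : PySem.Int.toChars ((v : Int)) = Nat.toDigits 10 v := by
    rw [PySem.Int.toChars]
    simp
  simp only [Option.getD_some, htc]
  by_cases hn : n = 0
  · subst hn
    have : v = 0 := by simp [hv]
    rw [this]
    decide
  · have hdig : Nat.digits 10 v = Nat.digits 2 n := by
      rw [hv]
      refine Nat.digits_ofDigits 10 (by norm_num) _ ?_ ?_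
      · intro d hd
        exact lt_trans (Nat.digits_lt_base (by norm_num) hd) (by norm_num)
      · intro h
        exact Nat.getLast_digit_ne_zero 2 hn
    have hv0 : v ≠ 0 := by
      intro h0
      have : Nat.digits 10 v = [] := by rw [h0]; simp
      rw [hdig] at this
      exact Nat.digits_ne_nil_iff_ne_zero.mpr hn this
    rw [toDigits_eq 10 v (by norm_num), toDigits_eq 2 n (by norm_num),
      if_neg hv0, if_neg hn, digCh, digCh, hdig]

-- the per-element chunk list of A equals B's per-element pair list (as a dispatch fold)
theorem elem_fold (i : Int) (hi : 0 ≤ i) (acc : List Int) :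
    (pyWrap2 (PySem.Chars.zfill
        (PySem.Int.toChars
          ((pyIntDigits? (PySem.List.slice (PySem.Int.toBinChars0b i) (some 2) none)).getD 0)) 8)).foldl
      pairToInt acc = acc ++ pairsB (bitsB i.toNat 8) := by
  have hbin : PySem.List.slice (PySem.Int.toBinChars0b i) (some 2) none
      = Nat.toDigits 2 i.toNat := by
    rw [PySem.Int.toBinChars0b, if_neg (by omega)]
    rw [show ((2 : Int)) = ((2 : Nat) : Int) from by norm_num,
      PySem.List.slice_from_natCast]
    rfl
  rw [hbin, roundtrip]
  have h16 : ((8 : Int)) = ((8 : Nat) : Int) := by norm_num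
  rw [h16, zfill_toDigits i.toNat 8 (by norm_num)]
  exact dispatch_eq_pairs (bitsB i.toNat 8) (fun x hx => bitsB_mem hx) acc

theorem header_fold (xs : List Int) (acc : List Int) :
    (pyWrap2 (PySem.Chars.zfill (PySem.Int.toBinChars (PySem.List.len xs)) 16)).foldl
      pairToInt acc = acc ++ pairsB (bitsB xs.length 16) := by
  have h1 : PySem.Int.toBinChars (PySem.List.len xs) = Nat.toDigits 2 xs.length := by
    rw [PySem.List.len, PySem.Int.toBinChars, if_neg (by omega)]
    simp
  have h16 : ((16 : Int)) = ((16 : Nat) : Int) := by norm_num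
  rw [h1, h16, zfill_toDigits xs.length 16 (by norm_num)]
  exact dispatch_eq_pairs (bitsB xs.length 16) (fun x hx => bitsB_mem hx) acc

theorem flat_fold (xs : List Int) (hx : ∀ i ∈ xs, 0 ≤ i) :
    ∀ acc, ((xs.flatMap (fun i => pyWrap2 (PySem.Chars.zfill
        (PySem.Int.toChars
          ((pyIntDigits? (PySem.List.slice (PySem.Int.toBinChars0b i) (some 2) none)).getD 0)) 8))).foldl
      pairToInt acc)
      = xs.foldl (fun out i => out ++ pairsB (bitsB i.toNat 8)) acc := by
  induction xs with
  | nil => intro acc; simp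
  | cons x rest ih =>
    intro acc
    simp only [List.flatMap_cons, List.foldl_append, List.foldl_cons]
    rw [elem_fold x (hx x (by simp)) acc]
    exact ih (fun i hi => hx i (by simp [hi])) _

-- ===== VERDICT (by name: the statement is the Claim_ definition above) =====
theorem divider_spec : Claim_equal_divider := by
  intro xs _ hpre
  show divider xs = divider_alt xs
  unfold divider divider_alt
  simp only []
  rw [PySem.List.foldl_append_eq_flatMap]
  rw [List.nil_append]
  rw [header_fold xs []]
  rw [List.nil_append]
  exact flat_fold xs hpre (pairsB (bitsB xs.length 16))
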